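-- pv_equiv track=rewrite | github.com/farhan0581/gfgcodes | newpractise/dp/ninja_training.py | solve
-- ===== SOURCE A (Python) =====
-- def solve(arr):
--     dp = [[-1 for i in range(3)] for i in range(len(arr))]
--     dp[0] = arr[0]
--     for i in range(1, len(arr)):
--         for j in range(3):
--             m = -99999999
--             for k in range(3):
--                 if k != j:
--                     m = max(m, dp[i-1][k])
--
--             dp[i][j] = arr[i][j] + m
--
--     return max(dp[len(arr)-1])
-- ===== SOURCE B (Python) =====
-- def solve(arr):
--     # Top-down memoized recursion over (day, task); the max with -99999999
--     # deliberately reproduces A's floor on hugely negative running scores.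
--     n = len(arr)
--     if n == 1:
--         return max(arr[0])
--     memo = {}
--
--     def g(i, j):
--         if i == 0:
--             return arr[0][j]
--         if (i, j) not in memo:
--             memo[(i, j)] = arr[i][j] + max(
--                 -99999999, max(g(i - 1, k) for k in range(3) if k != j))
--         return memo[(i, j)]
--
--     return max(g(n - 1, j) for j in range(3))
-- ===== Notes on version B (the rewrite author's own statement) =====
-- stated objective: alternative
-- what changed: Replaced A's bottom-up preallocated n x 3 dp table with its j/k index loops by a top-down memoized recursion g(day, task) over the same recurrence (including A's -99999999 floor), with a separate single-day base case.
import Mathlib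
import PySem

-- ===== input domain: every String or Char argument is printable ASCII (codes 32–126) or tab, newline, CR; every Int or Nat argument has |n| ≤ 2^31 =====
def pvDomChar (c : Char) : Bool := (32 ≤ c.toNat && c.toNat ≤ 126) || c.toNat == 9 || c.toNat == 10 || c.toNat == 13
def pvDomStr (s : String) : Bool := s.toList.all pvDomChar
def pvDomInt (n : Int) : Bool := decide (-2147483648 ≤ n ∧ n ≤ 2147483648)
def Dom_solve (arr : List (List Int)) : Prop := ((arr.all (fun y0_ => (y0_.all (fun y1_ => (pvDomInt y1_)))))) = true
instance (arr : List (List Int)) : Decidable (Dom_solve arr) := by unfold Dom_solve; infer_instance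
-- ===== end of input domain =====

-- B replaces A's bottom-up dp table by a top-down memoized recursion over (day, task)
-- computing the same recurrence (including A's -99999999 floor); objective: alternative.

-- ===== PORT A =====
def solve (arr : List (List Int)) : Int :=
  let n := arr.length
  let dp0 : List (List Int) := List.replicate n (List.replicate 3 (-1))
  let dp1 := dp0.set 0 (arr.headD [])          -- dp[0] = arr[0]
  let dp := (List.range' 1 (n - 1)).foldl
    (fun dp i =>
      dp.set i ((List.range 3).map (fun j =>
        ((arr.getD i []).getD j 0) +
        (List.range 3).foldl
          (fun m k => if k ≠ j then max m ((dp.getD (i - 1) []).getD k 0) else m)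
          (-99999999))))
    dp1
  match PySem.List.max? (dp.getD (n - 1) []) (fun y => y) with
  | some v => v
  | none => 0                                   -- max([]) raises in Python; unreachable under Pre_

-- ===== PORT B =====
-- Source B's recursion g(i, j) (the memo dict is a pure evaluation cache; the recursion
-- structure and the computed values are transcribed as they stand)
def pvG (arr : List (List Int)) : Nat → Nat → Int
  | 0, j => (arr.getD 0 []).getD j 0
  | i + 1, j =>
      (arr.getD (i + 1) []).getD j 0 +
        max (-99999999)
          ((PySem.List.max?
              (((List.range 3).filter (fun k => k != j)).map (fun k => pvG arr i k))
              (fun y => y)).getD 0)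

def solve_alt (arr : List (List Int)) : Int :=
  let n := arr.length
  if n = 1 then
    (PySem.List.max? (arr.headD []) (fun y => y)).getD 0   -- max(arr[0]); raises in Python iff empty, unreachable under Pre_
  else
    (PySem.List.max? ((List.range 3).map (fun j => pvG arr (n - 1) j)) (fun y => y)).getD 0

-- ===== PRECONDITION & SPEC =====
-- Pre_ excludes exactly the inputs on which A raises IndexError/ValueError:
-- empty arr, a single-day arr with an empty row, a multi-day arr with a row shorter than 3.
def Pre_solve (arr : List (List Int)) : Prop :=
  arr ≠ [] ∧ (arr.length = 1 → arr.headD [] ≠ []) ∧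
    (2 ≤ arr.length → ∀ row ∈ arr, 3 ≤ row.length)
instance (arr : List (List Int)) : Decidable (Pre_solve arr) := by unfold Pre_solve; infer_instance

def pvWitness_solve : List (List Int) := [[10, 40, 70], [20, 50, 80], [30, 60, 90]]

def Spec_solve (arr : List (List Int)) (out : Int) : Prop := out = solve_alt arr
instance (arr : List (List Int)) (out : Int) : Decidable (Spec_solve arr out) := by unfold Spec_solve; infer_instance

-- ===== CLAIM =====
def Claim_equal_solve : Prop := ∀ (arr : List (List Int)), Dom_solve arr → Pre_solve arr → Spec_solve arr (solve arr)

-- ===== LEMMAS AND PROOFS =====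

theorem pv_getD_set_self {α : Type} : ∀ (l : List α) (i : Nat) (v d : α), i < l.length → (l.set i v).getD i d = v := by
  intro l
  induction l with
  | nil => intro i v d h; simp at h
  | cons x t ih =>
    intro i v d h
    cases i with
    | zero => simp [List.getD]
    | succ i =>
      simp only [List.set]
      simp [List.getD] at ih ⊢
      exact ih i v d (by simpa using Nat.lt_of_succ_lt_succ h)

theorem pv_range'_succ (s n : Nat) : List.range' s (n + 1) = s :: List.range' (s + 1) n := rfl

theorem pvG_succ (arr : List (List Int)) (t j : Nat) :
    pvG arr (t + 1) j =
      (arr.getD (t + 1) []).getD j 0 +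
        max (-99999999)
          ((PySem.List.max?
              (((List.range 3).filter (fun k => k != j)).map (fun k => pvG arr t k))
              (fun y => y)).getD 0) := rfl

theorem body_eval (arr dp : List (List Int)) (t : Nat)
    (h0 : (dp.getD t []).getD 0 0 = pvG arr t 0)
    (h1 : (dp.getD t []).getD 1 0 = pvG arr t 1)
    (h2 : (dp.getD t []).getD 2 0 = pvG arr t 2) :
    ((List.range 3).map (fun j =>
        ((arr.getD (t + 1) []).getD j 0) +
        (List.range 3).foldl
          (fun m k => if k ≠ j then max m ((dp.getD t []).getD k 0) else m)
          (-99999999))) =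
    [pvG arr (t + 1) 0, pvG arr (t + 1) 1, pvG arr (t + 1) 2] := by
  have h3 : List.range 3 = [0, 1, 2] := rfl
  simp only [h3, List.map_cons, List.map_nil, List.foldl_cons, List.foldl_nil,
    pvG_succ, List.filter, h0, h1, h2]
  simp [PySem.List.max?]
  refine ⟨?_, ?_, ?_⟩ <;> (split_ifs <;> (simp only [Option.getD_some]; omega))

theorem solve_loop (arr : List (List Int)) :
    ∀ (m s : Nat) (dp : List (List Int)),
      1 ≤ m → 1 ≤ s → s + m = arr.length → dp.length = arr.length →
      (dp.getD (s - 1) []).getD 0 0 = pvG arr (s - 1) 0 →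
      (dp.getD (s - 1) []).getD 1 0 = pvG arr (s - 1) 1 →
      (dp.getD (s - 1) []).getD 2 0 = pvG arr (s - 1) 2 →
      ((List.range' s m).foldl
        (fun dp i =>
          dp.set i ((List.range 3).map (fun j =>
            ((arr.getD i []).getD j 0) +
            (List.range 3).foldl
              (fun m k => if k ≠ j then max m ((dp.getD (i - 1) []).getD k 0) else m)
              (-99999999))))
        dp).getD (arr.length - 1) [] =
      [pvG arr (arr.length - 1) 0, pvG arr (arr.length - 1) 1, pvG arr (arr.length - 1) 2] := by
  intro m
  induction m with
  | zero => intro s dp hm; exact absurd hm (by omega)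
  | succ m ih =>
    intro s dp _ hs hsm hlen h0 h1 h2
    obtain ⟨t, rfl⟩ : ∃ t, s = t + 1 := ⟨s - 1, by omega⟩
    have hts : t + 1 - 1 = t := rfl
    rw [hts] at h0 h1 h2
    have hbody := body_eval arr dp t h0 h1 h2
    rw [pv_range'_succ, List.foldl_cons]
    simp only [Nat.add_sub_cancel]
    rw [hbody]
    have hlt : t + 1 < dp.length := by omega
    have hset := pv_getD_set_self dp (t + 1)
      [pvG arr (t + 1) 0, pvG arr (t + 1) 1, pvG arr (t + 1) 2] [] hlt
    cases m with
    | zero =>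
      rw [show List.range' (t + 1 + 1) 0 = [] from rfl, List.foldl_nil,
        show arr.length - 1 = t + 1 from by omega, hset]
    | succ m' =>
      exact ih (t + 1 + 1) _ (by omega) (by omega) (by omega) (by simpa using hlen)
        (by rw [show t + 1 + 1 - 1 = t + 1 from rfl, hset]; rfl)
        (by rw [show t + 1 + 1 - 1 = t + 1 from rfl, hset]; rfl)
        (by rw [show t + 1 + 1 - 1 = t + 1 from rfl, hset]; rfl)

-- ===== VERDICT =====
theorem solve_spec : Claim_equal_solve := by
  intro arr _ hpre
  obtain ⟨hne, h1, h3⟩ := hpre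
  unfold Spec_solve
  cases arr with
  | nil => exact absurd rfl hne
  | cons r0 rest =>
    cases rest with
    | nil =>
      simp only [solve, solve_alt, List.length_cons, List.length_nil, Nat.zero_add,
        Nat.sub_self, List.range'_zero, List.foldl_nil, List.headD_cons]
      rw [pv_getD_set_self _ 0 _ [] (by simp)]
      cases h : PySem.List.max? r0 (fun y => y) with
      | none => simp [PySem.List.max?_eq_none_iff] at h; exact absurd h (h1 rfl)
      | some v => simp
    | cons r1 rest' =>
      have hset0 : ((List.replicate (r0 :: r1 :: rest').length
          (List.replicate 3 (-1 : Int))).set 0 ((r0 :: r1 :: rest').headD [])).getD 0 [] = r0 := by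
        rw [List.headD_cons]
        exact pv_getD_set_self _ 0 _ [] (by simp)
      have hcomp : ∀ k, (((List.replicate (r0 :: r1 :: rest').length
          (List.replicate 3 (-1 : Int))).set 0 ((r0 :: r1 :: rest').headD [])).getD (1 - 1) []).getD k 0
          = pvG (r0 :: r1 :: rest') 0 k := by
        intro k
        rw [show (1 : Nat) - 1 = 0 from rfl, hset0]
        simp [pvG]
      have key := solve_loop (r0 :: r1 :: rest') ((r1 :: rest').length) 1
        ((List.replicate (r0 :: r1 :: rest').length
            (List.replicate 3 (-1 : Int))).set 0 ((r0 :: r1 :: rest').headD []))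
        (by simp) (by omega) (by simp; omega) (by simp)
        (hcomp 0) (hcomp 1) (hcomp 2)
      simp only [List.length_cons, Nat.add_sub_cancel] at key
      simp only [solve, solve_alt, List.length_cons, Nat.add_sub_cancel]
      rw [key, show (List.range 3) = [0, 1, 2] from rfl]
      simp only [List.map_cons, List.map_nil]
      cases h : PySem.List.max?
          [pvG (r0 :: r1 :: rest') (rest'.length + 1) 0, pvG (r0 :: r1 :: rest') (rest'.length + 1) 1,
            pvG (r0 :: r1 :: rest') (rest'.length + 1) 2] (fun y => y) with
      | none => simp [PySem.List.max?_eq_none_iff] at h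
      | some v => simp
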